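-- pv_equiv track=rewrite | github.com/Beau28713/Solved_pybites_bites | bite_180/names.py | group_names_by_country
-- ===== SOURCE A (Python) =====
-- from collections import defaultdict
-- from itertools import groupby
--
-- data = """last_name,first_name,country_code
-- Watsham,Husain,ID
-- Harrold,Alphonso,BR
-- Apdell,Margo,CN
-- Tomblings,Deerdre,RU
-- Wasielewski,Sula,ID
-- Jeffry,Rudolph,TD
-- Brenston,Luke,SE
-- Parrett,Ines,CN
-- Braunle,Kermit,PL
-- Halbard,Davie,CN"""
--
-- def group_names_by_country(data: str = data) -> defaultdict:
--     countries = defaultdict(list)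
--
--     data_list = [x.split(',') for x in data.split()]
--
--     group_itter = groupby(data_list[1:], lambda x: x[2])
--
--     for key, group in group_itter:
--         for thing in group: # group is a list of list
--             r = reversed(thing)
--             y = ' '.join(r)
--
--             if thing[2] in countries:
--                 countries[thing[2]].insert(0, y[3:])
--             else:
--                 countries[thing[2]].insert(0, y[3:])
--
--     return countries
-- ===== SOURCE B (Python) =====
-- from collections import defaultdict
--
-- data = """last_name,first_name,country_code
-- Watsham,Husain,ID
-- Harrold,Alphonso,BR
-- Apdell,Margo,CN
-- Tomblings,Deerdre,RU
-- Wasielewski,Sula,ID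
-- Jeffry,Rudolph,TD
-- Brenston,Luke,SE
-- Parrett,Ines,CN
-- Braunle,Kermit,PL
-- Halbard,Davie,CN"""
--
-- def group_names_by_country(data: str = data) -> defaultdict:
--     rows = [tok.split(',') for tok in data.split()[1:]]
--     codes = list(dict.fromkeys(r[2] for r in rows))
--     countries = defaultdict(list)
--     for code in codes:
--         countries[code] = [' '.join(reversed(r))[3:] for r in reversed(rows) if r[2] == code]
--     return countries
-- ===== Notes on version B (the rewrite author's own statement) =====
-- stated objective: alternative
-- what changed: Replaces A's incremental dict accumulation (groupby wrapper + per-row front-insertion into a growing bucket) by a staged grouping: first collect the distinct country codes in first-appearance order with dict.fromkeys, then build each country's list in one comprehension that filters the reversed row list per code.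
import Mathlib
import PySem

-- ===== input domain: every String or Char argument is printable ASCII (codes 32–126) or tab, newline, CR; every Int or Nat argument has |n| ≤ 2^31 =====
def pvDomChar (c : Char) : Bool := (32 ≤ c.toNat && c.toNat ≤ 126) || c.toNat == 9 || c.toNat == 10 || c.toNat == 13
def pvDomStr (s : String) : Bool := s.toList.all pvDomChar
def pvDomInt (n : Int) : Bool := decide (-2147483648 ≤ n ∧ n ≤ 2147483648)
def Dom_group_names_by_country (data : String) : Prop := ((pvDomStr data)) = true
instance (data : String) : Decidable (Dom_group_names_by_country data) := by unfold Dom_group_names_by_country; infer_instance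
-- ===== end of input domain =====

-- B drops the no-op groupby and the incremental bucket accumulation: it first collects the
-- distinct codes in first-appearance order, then builds each country's list by filtering the
-- reversed rows per code (alternative staged grouping; same return value).

-- ===== PORT A =====

-- the comma-split of a token (the separator is non-empty, so split? is always some; the default is never used)
def pvSplitComma (x : String) : List String := (PySem.Str.split? x ",").getD [x]

-- the groupby key  lambda x: x[2]  (raises IndexError on short rows in Python; outside Pre_)
def pvRowKey (row : List String) : String := (PySem.List.pyGet? row 2).getD ""

-- body of A's inner loop: r = reversed(thing); y = ' '.join(r); countries[thing[2]].insert(0, y[3:])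
-- (both branches of A's if/else are the identical statement, kept as in A)
def pvAStep (countries : PySem.Dict String (List String)) (thing : List String) :
    PySem.Dict String (List String) :=
  let y : String := PySem.Str.join " " thing.reverse
  match PySem.List.pyGet? thing 2 with
  | none => countries   -- Python raises IndexError here; excluded by Pre_
  | some k =>
      if countries.contains k then
        countries.insert k (PySem.List.insert (countries.getD k []) 0 (PySem.Str.slice y (some 3) none))
      else
        countries.insert k (PySem.List.insert (countries.getD k []) 0 (PySem.Str.slice y (some 3) none))

def group_names_by_country (data : String) : List (String × List String) :=
  let data_list : List (List String) := (PySem.Str.split₀ data).map pvSplitComma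
  -- itertools.groupby(data_list[1:], lambda x: x[2]) : consecutive runs of equal key, with their key
  let group_itter : List (String × List (List String)) :=
    ((data_list.drop 1).splitBy (fun a b => pvRowKey a == pvRowKey b)).map
      (fun g => (pvRowKey (g.headD []), g))
  (group_itter.foldl (fun countries kg => kg.2.foldl pvAStep countries) PySem.Dict.empty).items

-- ===== PORT B =====

-- the formatted name  ' '.join(reversed(r))[3:]
def pvName (r : List String) : String :=
  PySem.Str.slice (PySem.Str.join " " r.reverse) (some 3) none

def group_names_by_country_alt (data : String) : List (String × List String) :=
  let rows : List (List String) := ((PySem.Str.split₀ data).drop 1).map pvSplitComma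
  -- codes = list(dict.fromkeys(r[2] for r in rows))
  let codes : List String := PySem.List.dedup (rows.map pvRowKey)
  -- for code in codes: countries[code] = [' '.join(reversed(r))[3:] for r in reversed(rows) if r[2] == code]
  let countries := codes.foldl
    (fun d code =>
      d.insert code ((rows.reverse.filter (fun r => pvRowKey r == code)).map pvName))
    PySem.Dict.empty
  countries.items

-- ===== PRECONDITION & SPEC =====
-- Pre_ excludes exactly the inputs on which Python A raises IndexError (thing[2]):
-- some whitespace-separated token after the first has fewer than 3 comma-separated fields.
def Pre_group_names_by_country (data : String) : Prop :=
  ∀ tok ∈ (PySem.Str.split₀ data).drop 1, 3 ≤ (pvSplitComma tok).length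
instance (data : String) : Decidable (Pre_group_names_by_country data) := by
  unfold Pre_group_names_by_country; infer_instance

def pvWitness_group_names_by_country : String := "h,h,h a,b,cd e,f,cd"

def Spec_group_names_by_country (data : String) (out : List (String × List String)) : Prop :=
  out = group_names_by_country_alt data
instance (data : String) (out : List (String × List String)) :
    Decidable (Spec_group_names_by_country data out) := by
  unfold Spec_group_names_by_country; infer_instance

-- ===== CLAIM (what is proved, stated in full; the proofs are below) =====
def Claim_equal_group_names_by_country : Prop :=
  ∀ (data : String), Dom_group_names_by_country data → Pre_group_names_by_country data →
    Spec_group_names_by_country data (group_names_by_country data)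

-- ===== LEMMAS AND PROOFS =====

-- on a row with at least 3 fields, A's step is a prepend-modify at the row's key
theorem pvAStep_eq_modify (d : PySem.Dict String (List String)) (r : List String)
    (h : 3 ≤ r.length) :
    pvAStep d r = d.modify (pvRowKey r) [] (fun v => pvName r :: v) := by
  have h2 : 2 < r.length := by omega
  have hget : PySem.List.pyGet? r 2 = some r[2] := by
    simp [PySem.List.pyGet?, PySem.List.pyIdx?, h2]
  unfold pvAStep pvRowKey pvName
  rw [hget]
  simp only [Option.getD_some]
  split_ifs <;> rw [PySem.List.insert_zero] <;> rfl

-- getD of a prepend-modify fold: the reversed filtered names, then the old bucket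
theorem pvGetD_foldl_prepend (l : List (List String)) (d : PySem.Dict String (List String))
    (c : String) :
    (l.foldl (fun d r => d.modify (pvRowKey r) [] (fun v => pvName r :: v)) d).getD c []
      = ((l.filter (fun r => pvRowKey r == c)).map pvName).reverse ++ d.getD c [] := by
  induction l generalizing d with
  | nil => simp
  | cons r rest ih =>
      simp only [List.foldl_cons, List.filter_cons]
      rw [ih]
      by_cases h : pvRowKey r = c
      · simp [h]
      · simp [h, PySem.Dict.getD_modify, Ne.symm h]

-- the keys of A's fold are the distinct codes in first-appearance order
theorem pvKeys_foldl_prepend (l : List (List String)) :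
    (l.foldl (fun d r => d.modify (pvRowKey r) [] (fun v => pvName r :: v))
        (PySem.Dict.empty : PySem.Dict String (List String))).keys
      = PySem.List.dedup (l.map pvRowKey) := by
  rw [PySem.Dict.keys_foldl_modify_key (key := pvRowKey) (d0 := [])
      (f := fun (_ : PySem.Dict String (List String)) r (v : List String) => pvName r :: v)]
  simp [PySem.Set.update, PySem.Set.ofList_eq_foldl, PySem.Dict.keys_empty]

-- ===== VERDICT (by name: the statement is the Claim_ definition above) =====
theorem group_names_by_country_spec : Claim_equal_group_names_by_country := by
  intro data _ hpre
  unfold Spec_group_names_by_country group_names_by_country group_names_by_country_alt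
  simp only []
  rw [List.foldl_map]
  -- A's groupby-of-runs fold is the plain fold over the data rows
  have hflat :
      ((((PySem.Str.split₀ data).map pvSplitComma).drop 1).splitBy
          (fun a b => pvRowKey a == pvRowKey b)).foldl
        (fun countries g => g.foldl pvAStep countries) PySem.Dict.empty
      = (((PySem.Str.split₀ data).map pvSplitComma).drop 1).foldl pvAStep PySem.Dict.empty := by
    conv_rhs => rw [← List.flatten_splitBy (fun a b => pvRowKey a == pvRowKey b)
      (((PySem.Str.split₀ data).map pvSplitComma).drop 1)]
    rw [List.foldl_flatten]
  rw [hflat, ← List.map_drop]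
  set rows : List (List String) := ((PySem.Str.split₀ data).drop 1).map pvSplitComma with hrows
  have hlen : ∀ r ∈ rows, 3 ≤ r.length := by
    intro r hr
    rw [hrows] at hr
    obtain ⟨tok, htok, rfl⟩ := List.mem_map.mp hr
    exact hpre tok htok
  -- A's step is the prepend-modify step on every row in scope
  rw [PySem.List.foldl_congr_mem (l := rows) (init := (PySem.Dict.empty : PySem.Dict String (List String)))
    (f := pvAStep)
    (g := fun d r => d.modify (pvRowKey r) [] (fun v => pvName r :: v))
    (fun d r hr => pvAStep_eq_modify d r (hlen r hr))]
  -- A's dict, characterised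
  have hnd : (rows.foldl (fun d r => d.modify (pvRowKey r) [] (fun v => pvName r :: v))
      (PySem.Dict.empty : PySem.Dict String (List String))).keys.Nodup := by
    exact PySem.Dict.nodup_keys_foldl_modify_key rows pvRowKey []
      (fun _ r (v : List String) => pvName r :: v) PySem.Dict.empty
      PySem.Dict.nodup_keys_empty
  rw [PySem.Dict.items_eq_map_keys _ hnd [], pvKeys_foldl_prepend]
  -- B's dict, characterised (fresh distinct keys append)
  have hfresh : ∀ c ∈ PySem.List.dedup (rows.map pvRowKey),
      (PySem.Dict.empty : PySem.Dict String (List String)).contains c = false := by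
    intro c _; exact PySem.Dict.contains_empty c
  have hB := PySem.Dict.items_foldl_insert_fresh
    (l := PySem.List.dedup (rows.map pvRowKey))
    (d := (PySem.Dict.empty : PySem.Dict String (List String)))
    (k := fun c => c)
    (v := fun c => (rows.reverse.filter (fun r => pvRowKey r == c)).map pvName)
    hfresh (by simp)
  beta_reduce at hB
  rw [hB]
  simp only [show (PySem.Dict.empty : PySem.Dict String (List String)).items = [] from rfl,
    List.nil_append]
  apply List.map_congr_left
  intro c _
  rw [pvGetD_foldl_prepend, PySem.Dict.getD_empty, List.append_nil,
    List.filter_reverse, List.map_reverse]
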